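-- pv_equiv track=rewrite | github.com/BenjaminMD/m | 1r/EuropaCatData.py | fill_list_with_blocks
-- ===== SOURCE A (Python) =====
-- def fill_list_with_blocks(indices, length):
--     result = []
--     current_value = 1  # Start with 1
--     for i in range(length):
--         if i in indices:
--             result.append(current_value)
--         else:
--             result.append(1 - current_value)  # Alternate between 0 and 1
--         if i + 1 in indices:
--             current_value = 1 - current_value  # Flip the value for the next block
--     return result
-- ===== SOURCE B (Python) =====
-- def fill_list_with_blocks(indices, length):
--     idx = set(indices)
--     n = length if length > 0 else 0
--     cuts = sorted(j for j in idx if 1 <= j < n)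
--     base = []
--     val = 1
--     prev = 0
--     for c in cuts:
--         base += [val] * (c - prev)
--         val, prev = 1 - val, c
--     base += [val] * (n - prev)
--     return [v if i in idx else 1 - v for i, v in enumerate(base)]
-- ===== Notes on version B (the rewrite author's own statement) =====
-- stated objective: faster
-- what changed: B replaces A's per-position scan with a look-ahead current_value flip by sorting the distinct toggle points once, building the base list as run-length blocks of constant value, and then flipping non-member positions in one pass over an enumerate with O(1) set membership, so A's O(len(indices)) list scans per position disappear.
import Mathlib
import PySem

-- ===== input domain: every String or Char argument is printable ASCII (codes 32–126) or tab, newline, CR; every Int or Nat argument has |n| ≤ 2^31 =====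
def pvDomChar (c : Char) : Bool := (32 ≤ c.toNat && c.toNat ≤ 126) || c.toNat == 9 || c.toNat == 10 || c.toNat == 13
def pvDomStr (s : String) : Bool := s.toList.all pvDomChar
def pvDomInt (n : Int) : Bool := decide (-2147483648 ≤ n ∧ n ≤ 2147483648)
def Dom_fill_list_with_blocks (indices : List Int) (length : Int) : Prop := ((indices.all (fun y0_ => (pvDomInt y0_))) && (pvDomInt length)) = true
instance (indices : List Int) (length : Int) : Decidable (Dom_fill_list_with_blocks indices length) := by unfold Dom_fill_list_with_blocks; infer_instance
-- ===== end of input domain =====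

-- B replaces A's stateful scan (current_value flipped by a look-ahead membership test on i+1)
-- with sort-the-toggle-points + run-length block construction + a membership flip pass;
-- objective: faster (no per-position scan of the indices list).
-- ===== PORT A =====
-- for i in range(length): append cv or 1-cv; look ahead: if i+1 in indices flip cv
def fillA (indices : List Int) (i : Int) (fuel : Nat) (acc : List Int) (cv : Int) : List Int :=
  match fuel with
  | 0 => acc
  | n + 1 =>
    let acc' := acc ++ [if i ∈ indices then cv else 1 - cv]
    let cv' := if (i + 1) ∈ indices then 1 - cv else cv
    fillA indices (i + 1) n acc' cv'

def fill_list_with_blocks (indices : List Int) (length : Int) : List Int :=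
  fillA indices 0 length.toNat [] 1

-- ===== PORT B =====
-- for c in cuts: base += [val] * (c - prev); val, prev = 1 - val, c  -- then the final block
def fillBlocks (cuts : List Int) (prev : Int) (val : Int) (n : Int) : List Int :=
  match cuts with
  | [] => PySem.List.pyRepeat [val] (n - prev)
  | c :: rest => PySem.List.pyRepeat [val] (c - prev) ++ fillBlocks rest c (1 - val) n

def fill_list_with_blocks_alt (indices : List Int) (length : Int) : List Int :=
  let idx := PySem.Set.ofList indices
  let n : Int := if length > 0 then length else 0
  let cuts := PySem.List.sorted (idx.filter (fun j => decide (1 ≤ j ∧ j < n))) (fun x => x) false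
  let base := fillBlocks cuts 0 1 n
  (PySem.List.enumerate base 0).map (fun p => if p.1 ∈ idx then p.2 else 1 - p.2)

-- ===== PRECONDITION & SPEC =====
def Spec_fill_list_with_blocks (indices : List Int) (length : Int) (out : List Int) : Prop := out = fill_list_with_blocks_alt indices length
instance (indices : List Int) (length : Int) (out : List Int) : Decidable (Spec_fill_list_with_blocks indices length out) := by unfold Spec_fill_list_with_blocks; infer_instance

-- ===== CLAIM (what is proved, stated in full; the proofs are below) =====
def Claim_equal_fill_list_with_blocks : Prop := ∀ (indices : List Int) (length : Int), Dom_fill_list_with_blocks indices length → Spec_fill_list_with_blocks indices length (fill_list_with_blocks indices length)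

-- ===== LEMMAS AND PROOFS =====
-- T indices i = number of distinct index values j with 1 ≤ j ≤ i (the toggle count up to i)
def pvT (indices : List Int) (i : Int) : Int :=
  (((PySem.Set.ofList indices).filter (fun j => decide (1 ≤ j ∧ j ≤ i))).length : Int)

-- the common per-position value both programs produce
def pvF (indices : List Int) (i : Int) : Int :=
  (pvT indices i + (if i ∈ PySem.Set.ofList indices then 1 else 0)) % 2

theorem pvT_nonneg (indices : List Int) (i : Int) : 0 ≤ pvT indices i := by
  unfold pvT; positivity

theorem filter_le_succ (l : List Int) (hl : l.Nodup) (i : Int) (hi : 0 ≤ i) :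
    ((l.filter (fun j => decide (1 ≤ j ∧ j ≤ i + 1))).length : Int)
      = ((l.filter (fun j => decide (1 ≤ j ∧ j ≤ i))).length : Int)
        + (if (i + 1) ∈ l then 1 else 0) := by
  induction l with
  | nil => simp
  | cons a t ih =>
    have hat : a ∉ t := (List.nodup_cons.mp hl).1
    have ht : t.Nodup := (List.nodup_cons.mp hl).2
    by_cases ha : a = i + 1
    · subst ha
      have h1 : (decide (1 ≤ i + 1 ∧ i + 1 ≤ i + 1)) = true := by simp; omega
      have h2 : (decide (1 ≤ i + 1 ∧ i + 1 ≤ i)) = false := by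
        simp only [decide_eq_false_iff_not, not_and, not_le]
        intro _
        omega
      have h3 : t.filter (fun j => decide (1 ≤ j ∧ j ≤ i + 1))
          = t.filter (fun j => decide (1 ≤ j ∧ j ≤ i)) := by
        apply List.filter_congr
        intro x hx
        have : x ≠ i + 1 := fun h => hat (h ▸ hx)
        simp only [decide_eq_decide]; omega
      rw [List.filter_cons, List.filter_cons, h1, h2, h3]
      simp only [if_true, Bool.false_eq_true, if_false, List.length_cons, List.mem_cons,
        true_or]
      push_cast
      ring
    · have hmem : ((i + 1) ∈ a :: t) ↔ ((i + 1) ∈ t) := by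
        simp [eq_comm, ha]
      have heq : (decide (1 ≤ a ∧ a ≤ i + 1)) = (decide (1 ≤ a ∧ a ≤ i)) := by
        simp only [decide_eq_decide]; omega
      rw [List.filter_cons, List.filter_cons, heq]
      by_cases hp : (decide (1 ≤ a ∧ a ≤ i)) = true
      · simp only [hp, if_true, List.length_cons, hmem]
        push_cast
        have := ih ht
        omega
      · simp only [hp, if_false, Bool.false_eq_true, hmem]
        exact ih ht

theorem pvT_succ (indices : List Int) (i : Int) (hi : 0 ≤ i) :
    pvT indices (i + 1)
      = pvT indices i + (if (i + 1) ∈ PySem.Set.ofList indices then 1 else 0) := by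
  unfold pvT
  exact filter_le_succ _ (PySem.Set.nodup_ofList indices) i hi

theorem pvT_zero (indices : List Int) : pvT indices 0 = 0 := by
  unfold pvT
  have : (PySem.Set.ofList indices).filter (fun j => decide (1 ≤ j ∧ j ≤ (0:Int))) = [] := by
    apply List.filter_eq_nil_iff.mpr
    intro j _
    simp only [decide_eq_true_eq, not_and, not_le]
    intro h
    omega
  rw [this]
  simp

-- A's scan produces the per-position closed-form values
theorem fillA_eq_map (indices : List Int) (fuel : Nat) :
    ∀ (i : Int) (acc : List Int), 0 ≤ i →
    fillA indices i fuel acc (1 - pvT indices i % 2)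
      = acc ++ (List.range fuel).map (fun k : Nat => pvF indices (i + (k : Int))) := by
  induction fuel with
  | zero => intro i acc _; simp [fillA]
  | succ n ih =>
    intro i acc hi
    rw [fillA]
    have hT := pvT_nonneg indices i
    have hmem : (i ∈ indices) ↔ (i ∈ PySem.Set.ofList indices) :=
      (PySem.Set.mem_ofList indices i).symm
    have hout : (if i ∈ indices then 1 - pvT indices i % 2 else 1 - (1 - pvT indices i % 2))
        = pvF indices i := by
      unfold pvF
      simp only [hmem]
      split <;> omega
    have hcv : (if (i + 1) ∈ indices then 1 - (1 - pvT indices i % 2)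
          else 1 - pvT indices i % 2) = 1 - pvT indices (i + 1) % 2 := by
      rw [pvT_succ indices i hi]
      have hmem' : ((i + 1) ∈ indices) ↔ ((i + 1) ∈ PySem.Set.ofList indices) :=
        (PySem.Set.mem_ofList indices (i + 1)).symm
      simp only [hmem']
      split <;> omega
    simp only [hout, hcv]
    rw [ih (i + 1) _ (by omega), List.range_succ_eq_map]
    have hmaps : (List.range n).map (fun k : Nat => pvF indices (i + 1 + k))
        = ((List.range n).map Nat.succ).map (fun k : Nat => pvF indices (i + k)) := by
      rw [List.map_map]
      apply List.map_congr_left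
      intro k _
      simp only [Function.comp]
      congr 1
      push_cast
      ring
    rw [List.map_cons, hmaps]
    simp

-- the block construction realises the countP-parity values on [prev, n)
theorem fillBlocks_eq_map (cuts : List Int) :
    ∀ (prev val n : Int), cuts.Pairwise (· < ·) → (∀ c ∈ cuts, prev < c ∧ c < n) →
      prev ≤ n →
    fillBlocks cuts prev val n
      = (PySem.List.pyRange prev n 1).map
          (fun i => if (cuts.countP (fun c => decide (c ≤ i))) % 2 = 0 then val else 1 - val) := by
  induction cuts with
  | nil =>
    intro prev val n _ _ _
    simp [fillBlocks, PySem.List.pyRepeat_singleton, List.map_const',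
      PySem.List.length_pyRange_one]
  | cons c rest ih =>
    intro prev val n hs hm hpn
    have hpc : prev < c := (hm c (List.mem_cons_self)).1
    have hcn : c < n := (hm c (List.mem_cons_self)).2
    have hrest : ∀ a ∈ rest, c < a := fun a ha => (List.pairwise_cons.mp hs).1 a ha
    rw [fillBlocks, PySem.List.pyRange_one_append prev c n (by omega) (by omega),
      List.map_append]
    congr 1
    · -- first block: every i in [prev, c) sees countP = 0
      have hconst : ∀ i ∈ PySem.List.pyRange prev c 1,
          (if ((c :: rest).countP (fun x => decide (x ≤ i))) % 2 = 0 then val else 1 - val)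
            = val := by
        intro i hi
        have hic : i < c := (PySem.List.mem_pyRange_one.mp hi).2
        have hcnt : (c :: rest).countP (fun x => decide (x ≤ i)) = 0 := by
          apply List.countP_eq_zero.mpr
          intro a ha
          rcases List.mem_cons.mp ha with h | h
          · subst h; simp; omega
          · have := hrest a h; simp; omega
        rw [hcnt]
        norm_num
      rw [List.map_congr_left hconst]
      simp [PySem.List.pyRepeat_singleton, List.map_const', PySem.List.length_pyRange_one]
    · -- remaining blocks: induction hypothesis with flipped value
      rw [ih c (1 - val) n (List.pairwise_cons.mp hs).2
        (fun a ha => ⟨hrest a ha, (hm a (List.mem_cons_of_mem c ha)).2⟩) (by omega)]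
      apply List.map_congr_left
      intro i hi
      have hci : c ≤ i := (PySem.List.mem_pyRange_one.mp hi).1
      have hcnt : (c :: rest).countP (fun x => decide (x ≤ i))
          = rest.countP (fun x => decide (x ≤ i)) + 1 := by
        rw [List.countP_cons]
        simp; omega
      rw [hcnt]
      rcases Nat.even_or_odd (rest.countP (fun x => decide (x ≤ i))) with he | ho
      · have h2 : (rest.countP (fun x => decide (x ≤ i))) % 2 = 0 := Nat.even_iff.mp he
        have h1 : (rest.countP (fun x => decide (x ≤ i)) + 1) % 2 ≠ 0 := by omega
        rw [if_pos h2, if_neg h1]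
      · have h2' : (rest.countP (fun x => decide (x ≤ i))) % 2 = 1 := Nat.odd_iff.mp ho
        have h2 : (rest.countP (fun x => decide (x ≤ i))) % 2 ≠ 0 := by omega
        have h1 : (rest.countP (fun x => decide (x ≤ i)) + 1) % 2 = 0 := by omega
        rw [if_pos h1, if_neg h2]
        ring

-- B's whole pipeline also produces the per-position closed-form values
theorem alt_eq_map (indices : List Int) (length : Int) :
    fill_list_with_blocks_alt indices length
      = (List.range length.toNat).map (fun k : Nat => pvF indices ((0:Int) + (k : Int))) := by
  simp only [fill_list_with_blocks_alt]
  set n : Int := if length > 0 then length else 0 with hn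
  have hn0 : 0 ≤ n := by rw [hn]; split <;> omega
  have hnN : n.toNat = length.toNat := by rw [hn]; split <;> omega
  set S := PySem.Set.ofList indices with hS
  set fl := S.filter (fun j => decide (1 ≤ j ∧ j < n)) with hfl
  set cuts := PySem.List.sorted fl (fun x => x) false with hcuts
  -- cuts is strictly increasing
  have hperm : cuts.Perm fl := PySem.List.sorted_perm fl (fun x => x) false
  have hnod : cuts.Nodup := hperm.nodup_iff.mpr ((PySem.Set.nodup_ofList indices).filter _)
  have hle : cuts.Pairwise (fun a b => a ≤ b) := PySem.List.sorted_pairwise fl (fun x => x)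
  have hlt : cuts.Pairwise (· < ·) :=
    (hle.and hnod).imp (fun h => lt_of_le_of_ne h.1 h.2)
  have hbounds : ∀ c ∈ cuts, 0 < c ∧ c < n := by
    intro c hc
    have : c ∈ fl := hperm.mem_iff.mp hc
    have := List.of_mem_filter this
    simp only [decide_eq_true_eq] at this
    exact ⟨by omega, this.2⟩
  -- counting cuts below i is counting toggles below i, for i < n
  have hcount : ∀ i : Int, 0 ≤ i → i < n →
      ((cuts.countP (fun c => decide (c ≤ i))) : Int) = pvT indices i := by
    intro i h0 hin
    rw [hperm.countP_eq, hfl, List.countP_filter]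
    have : (S.countP (fun c => decide (c ≤ i) && decide (1 ≤ c ∧ c < n)))
        = S.countP (fun c => decide (1 ≤ c ∧ c ≤ i)) := by
      apply List.countP_congr
      intro x _
      simp only [Bool.and_eq_true, decide_eq_true_eq]
      omega
    rw [this, List.countP_eq_length_filter]
    rfl
  -- the base list
  rw [fillBlocks_eq_map cuts 0 1 n hlt (fun c hc => ⟨(hbounds c hc).1, (hbounds c hc).2⟩) hn0]
  rw [PySem.List.enumerate_eq_map_pyRange _ (0 : Int)]
  simp only [PySem.List.len, List.length_map, PySem.List.length_pyRange_one, sub_zero]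
  rw [Int.toNat_of_nonneg hn0, List.map_map]
  have hfinal : ∀ i ∈ PySem.List.pyRange 0 n 1,
      ((fun p : Int × Int => if p.1 ∈ S then p.2 else 1 - p.2) ∘
        (fun j => (j, PySem.List.pyGetD ((PySem.List.pyRange 0 n 1).map
          (fun i => if (cuts.countP (fun c => decide (c ≤ i))) % 2 = 0 then 1 else 1 - 1)) j 0))) i
        = pvF indices i := by
    intro i hi
    have h0 : 0 ≤ i := (PySem.List.mem_pyRange_one.mp hi).1
    have hin : i < n := (PySem.List.mem_pyRange_one.mp hi).2
    simp only [Function.comp]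
    rw [PySem.List.pyGetD_map_pyRange_of_nonneg _ n i 0 h0 hin]
    have hT := pvT_nonneg indices i
    have hc := hcount i h0 hin
    have hpar : (if (cuts.countP (fun c => decide (c ≤ i))) % 2 = 0 then (1:Int) else 1 - 1)
        = 1 - pvT indices i % 2 := by
      rcases Nat.even_or_odd (cuts.countP (fun c => decide (c ≤ i))) with he | ho
      · have h2 : (cuts.countP (fun c => decide (c ≤ i))) % 2 = 0 := Nat.even_iff.mp he
        rw [if_pos h2]
        omega
      · have h2' : (cuts.countP (fun c => decide (c ≤ i))) % 2 = 1 := Nat.odd_iff.mp ho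
        have h2 : (cuts.countP (fun c => decide (c ≤ i))) % 2 ≠ 0 := by omega
        rw [if_neg h2]
        omega
    rw [hpar]
    unfold pvF
    split <;> omega
  rw [List.map_congr_left hfinal]
  rw [PySem.List.pyRange_one, List.map_map, sub_zero, hnN]
  apply List.map_congr_left
  intro k _
  simp [Function.comp]

-- ===== VERDICT (by name: the statement is the Claim_ definition above) =====
theorem fill_list_with_blocks_spec : Claim_equal_fill_list_with_blocks := by
  intro indices length _
  unfold Spec_fill_list_with_blocks fill_list_with_blocks
  rw [alt_eq_map]
  have h := fillA_eq_map indices length.toNat 0 [] (le_refl 0)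
  rw [pvT_zero] at h
  simpa using h
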